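-- pv_equiv track=rewrite | github.com/nastybcs/AOIS | lab1/core/calculator.py | bits_to_int_unsigned
-- ===== SOURCE A (Python) =====
-- def bits_to_int_unsigned(bits):
--     result = 0
--     n = len(bits)
--     power = 0
--     for i in range(n - 1, -1, -1):
--         if bits[i] == 1:
--             result += 2 ** power
--         power += 1
--     return result
-- ===== SOURCE B (Python) =====
-- def bits_to_int_unsigned(bits):
--     # Horner scheme: single forward pass, no indices or explicit powers.
--     result = 0
--     for b in bits:
--         result = 2 * result + (1 if b == 1 else 0)
--     return result
-- ===== Notes on version B (the rewrite author's own statement) =====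
-- stated objective: simpler
-- what changed: Replaces the reversed index loop with an explicit power counter and per-step 2**power exponentiation by a single forward Horner pass (result = 2*result + bit), eliminating indexing and power bookkeeping.
import Mathlib
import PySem

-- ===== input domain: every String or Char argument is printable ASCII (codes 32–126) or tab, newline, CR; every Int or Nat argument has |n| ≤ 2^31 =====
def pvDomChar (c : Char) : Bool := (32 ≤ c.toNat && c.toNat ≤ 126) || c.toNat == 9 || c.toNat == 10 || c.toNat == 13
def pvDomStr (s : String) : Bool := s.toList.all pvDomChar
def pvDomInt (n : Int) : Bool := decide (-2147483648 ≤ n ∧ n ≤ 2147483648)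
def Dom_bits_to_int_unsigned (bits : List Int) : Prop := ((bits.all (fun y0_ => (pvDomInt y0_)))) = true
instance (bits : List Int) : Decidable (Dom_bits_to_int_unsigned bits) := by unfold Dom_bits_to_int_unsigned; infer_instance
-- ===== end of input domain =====

-- B replaces A's reversed index loop with explicit power bookkeeping by a single forward Horner pass (simpler; same return value).

-- ===== PORT A =====
def bits_to_int_unsigned (bits : List Int) : Int :=
  let n : Int := bits.length
  ((PySem.List.pyRange (n - 1) (-1) (-1)).foldl
    (fun (st : Int × Int) i =>
      ((if PySem.List.pyGetD bits i 0 == 1 then st.1 + 2 ^ st.2.toNat else st.1), st.2 + 1))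
    (0, 0)).1

-- ===== PORT B =====
def bits_to_int_unsigned_alt (bits : List Int) : Int :=
  bits.foldl (fun result b => 2 * result + (if b == 1 then 1 else 0)) 0

-- ===== PRECONDITION & SPEC =====
def Spec_bits_to_int_unsigned (bits : List Int) (out : Int) : Prop := out = bits_to_int_unsigned_alt bits
instance (bits : List Int) (out : Int) : Decidable (Spec_bits_to_int_unsigned bits out) := by unfold Spec_bits_to_int_unsigned; infer_instance

-- ===== CLAIM (what is proved, stated in full; the proofs are below) =====
def Claim_equal_bits_to_int_unsigned : Prop := ∀ (bits : List Int), Dom_bits_to_int_unsigned bits → Spec_bits_to_int_unsigned bits (bits_to_int_unsigned bits)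

-- ===== LEMMAS AND PROOFS =====

-- Horner value of xs ++ [b]: shift the value of xs, add the last digit.
lemma alt_append_singleton (ys : List Int) (b : Int) :
    bits_to_int_unsigned_alt (ys ++ [b]) =
      2 * bits_to_int_unsigned_alt ys + (if b == 1 then 1 else 0) := by
  simp [bits_to_int_unsigned_alt, List.foldl_append]

-- A's countdown loop, generalized over the accumulator (result, power):
-- it adds the Horner value of xs scaled by 2^power, and advances power by |xs|.
lemma loopA (xs : List Int) (r p : Int) (hp : 0 ≤ p) :
    (PySem.List.pyRange ((xs.length : Int) - 1) (-1) (-1)).foldl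
        (fun (st : Int × Int) i =>
          ((if PySem.List.pyGetD xs i 0 == 1 then st.1 + 2 ^ st.2.toNat else st.1), st.2 + 1))
        (r, p)
      = (r + bits_to_int_unsigned_alt xs * 2 ^ p.toNat, p + xs.length) := by
  induction xs using List.reverseRecOn generalizing r p with
  | nil =>
      rw [PySem.List.pyRange_neg_one_eq_nil (by norm_num)]
      simp [bits_to_int_unsigned_alt]
  | append_singleton ys b ih =>
      have hlen : ((ys ++ [b]).length : Int) - 1 = (ys.length : Int) := by
        simp
      rw [hlen, PySem.List.pyRange_neg_one_cons (by omega)]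
      have hget : PySem.List.pyGetD (ys ++ [b]) (ys.length : Int) 0 = b := by
        rw [PySem.List.pyGetD_eq_getElem _ _ (by positivity) (by simp)]
        simp
      have hcongr :
          (PySem.List.pyRange ((ys.length : Int) - 1) (-1) (-1)).foldl
            (fun (st : Int × Int) i =>
              ((if PySem.List.pyGetD (ys ++ [b]) i 0 == 1 then st.1 + 2 ^ st.2.toNat else st.1),
                st.2 + 1))
            ((if b == 1 then r + 2 ^ p.toNat else r), p + 1)
          = (PySem.List.pyRange ((ys.length : Int) - 1) (-1) (-1)).foldl
            (fun (st : Int × Int) i =>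
              ((if PySem.List.pyGetD ys i 0 == 1 then st.1 + 2 ^ st.2.toNat else st.1),
                st.2 + 1))
            ((if b == 1 then r + 2 ^ p.toNat else r), p + 1) := by
        apply PySem.List.foldl_congr_mem
        intro acc i hi
        have hmem := (PySem.List.mem_pyRange_neg_one).mp hi
        have h0 : (0:Int) ≤ i := by omega
        have h1 : i < (ys.length : Int) := by omega
        have : PySem.List.pyGetD (ys ++ [b]) i 0 = PySem.List.pyGetD ys i 0 := by
          rw [PySem.List.pyGetD_eq_getElem _ _ h0 (by simp; omega),
              PySem.List.pyGetD_eq_getElem _ _ h0 (by exact_mod_cast h1)]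
          rw [List.getElem_append_left (by omega)]
        rw [this]
      simp only [List.foldl_cons, hget, hcongr]
      rw [ih _ _ (by omega)]
      have hp1 : (p + 1).toNat = p.toNat + 1 := by omega
      rw [alt_append_singleton]
      by_cases hb : b = 1
      · simp only [hb, hp1, pow_succ, Prod.mk.injEq, beq_iff_eq, if_true,
          List.length_append, List.length_cons, List.length_nil]
        refine ⟨by ring, by push_cast; ring⟩
      · simp only [hb, hp1, pow_succ, Prod.mk.injEq, beq_iff_eq,
          List.length_append, List.length_cons, List.length_nil]
        refine ⟨by push_cast; ring, by push_cast; ring⟩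

-- ===== VERDICT (by name: the statement is the Claim_ definition above) =====
theorem bits_to_int_unsigned_spec : Claim_equal_bits_to_int_unsigned := by
  intro bits _
  show bits_to_int_unsigned bits = bits_to_int_unsigned_alt bits
  show ((PySem.List.pyRange ((bits.length : Int) - 1) (-1) (-1)).foldl
      (fun (st : Int × Int) i =>
        ((if PySem.List.pyGetD bits i 0 == 1 then st.1 + 2 ^ st.2.toNat else st.1), st.2 + 1))
      (0, 0)).1 = bits_to_int_unsigned_alt bits
  rw [loopA bits 0 0 le_rfl]
  simp
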